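-- pv_equiv track=rewrite | github.com/huuthieu/leetcode-begin | python/0055-jump-game.py | findReachablePositions
-- ===== SOURCE A (Python) =====
-- def findReachablePositions(nums):
--     """
--     Return list of all indices we can reach
--
--     Time: O(n)
--     Space: O(n) for result
--     """
--     reachable = [False] * len(nums)
--     reachable[0] = True
--     max_reach = 0
--
--     for i in range(len(nums)):
--         if i > max_reach:
--             break
--
--         max_reach = max(max_reach, i + nums[i])
--
--         for j in range(i + 1, min(max_reach + 1, len(nums))):
--             reachable[j] = True
--
--     return [i for i in range(len(nums)) if reachable[i]]
-- ===== SOURCE B (Python) =====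
-- def findReachablePositions(nums):
--     """Single pass: compute the furthest reachable index, output the contiguous prefix."""
--     max_reach = 0
--     for i, x in enumerate(nums):
--         if i > max_reach:
--             break
--         max_reach = max(max_reach, i + x)
--     return list(range(min(max_reach, len(nums) - 1) + 1))
-- ===== Notes on version B (the rewrite author's own statement) =====
-- stated objective: faster
-- what changed: Dropped the boolean reachable array, the inner marking loop and the final filtering comprehension; B computes max_reach in one pass and returns the contiguous range [0, min(max_reach, n-1)] in closed form.
import Mathlib
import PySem

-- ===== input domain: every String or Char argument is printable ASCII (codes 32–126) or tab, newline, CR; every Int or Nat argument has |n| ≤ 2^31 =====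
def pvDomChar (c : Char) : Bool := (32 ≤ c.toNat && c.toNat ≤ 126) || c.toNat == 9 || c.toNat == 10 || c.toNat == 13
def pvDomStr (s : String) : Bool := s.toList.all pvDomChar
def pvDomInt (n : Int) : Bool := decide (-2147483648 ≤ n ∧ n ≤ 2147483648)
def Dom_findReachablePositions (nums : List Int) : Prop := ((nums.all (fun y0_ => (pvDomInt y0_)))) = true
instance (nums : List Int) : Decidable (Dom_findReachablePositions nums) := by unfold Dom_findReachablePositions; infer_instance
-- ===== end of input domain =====

-- B replaces A's boolean array + inner marking loop + final filter by a single max_reach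
-- pass and a closed-form contiguous range; equivalence of the return values is proved below.

-- ===== PORT A =====
-- outer 'for i in range(len(nums))' with break, carrying (reachable, max_reach);
-- 'nums[i]' is in range here, so nums.getD i 0 is exact; the inner
-- 'for j in range(i+1, min(max_reach+1, len(nums))): reachable[j] = True' is the foldl of set
-- (every such j is a valid non-negative index, so List.set/Int.toNat are exact).
def loopA (nums : List Int) (i : Nat) (r : List Bool) (m : Int) : List Bool :=
  if _h : i < nums.length then
    if (i : Int) > m then r
    else
      let m' := max m ((i : Int) + nums.getD i 0)
      let r' := (PySem.List.pyRange ((i : Int) + 1) (min (m' + 1) (nums.length : Int)) 1).foldl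
                  (fun acc j => acc.set j.toNat true) r
      loopA nums (i + 1) r' m'
  else r
termination_by nums.length - i

def findReachablePositions (nums : List Int) : List Int :=
  let reachable := (List.replicate nums.length false).set 0 true
  let r := loopA nums 0 reachable 0
  (PySem.List.pyRange 0 (nums.length : Int) 1).filter (fun i => r.getD i.toNat false)

-- ===== PORT B =====
-- single pass computing max_reach with the same break condition
def loopB (nums : List Int) (i : Nat) (m : Int) : Int :=
  if _h : i < nums.length then
    if (i : Int) > m then m
    else loopB nums (i + 1) (max m ((i : Int) + nums.getD i 0))
  else m
termination_by nums.length - i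

def findReachablePositions_alt (nums : List Int) : List Int :=
  PySem.List.pyRange 0 (min (loopB nums 0 0) ((nums.length : Int) - 1) + 1) 1

-- ===== PRECONDITION & SPEC =====
-- Pre_ excludes only the empty list, on which A raises IndexError (reachable[0] = True).
def Pre_findReachablePositions (nums : List Int) : Prop := nums ≠ []
instance (nums : List Int) : Decidable (Pre_findReachablePositions nums) := by
  unfold Pre_findReachablePositions; infer_instance
def pvWitness_findReachablePositions : List Int := [2, 0, 1, 0]

def Spec_findReachablePositions (nums : List Int) (out : List Int) : Prop :=
  out = findReachablePositions_alt nums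
instance (nums : List Int) (out : List Int) : Decidable (Spec_findReachablePositions nums out) := by
  unfold Spec_findReachablePositions; infer_instance

-- ===== CLAIM (what is proved, stated in full; the proofs are below) =====
def Claim_equal_findReachablePositions : Prop := ∀ (nums : List Int), Dom_findReachablePositions nums → Pre_findReachablePositions nums → Spec_findReachablePositions nums (findReachablePositions nums)

-- ===== LEMMAS AND PROOFS =====

-- the inner marking loop: length is preserved
lemma foldl_set_length (l : List Int) (r : List Bool) :
    (l.foldl (fun acc j => acc.set j.toNat true) r).length = r.length := by
  induction l generalizing r with
  | nil => rfl
  | cons x xs ih => simp [List.foldl, ih]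

-- the inner marking loop: pointwise effect
lemma foldl_set_getD (a b : Int) (ha : 0 ≤ a) (r : List Bool) (j : Nat) :
    ((PySem.List.pyRange a b 1).foldl (fun acc k => acc.set k.toNat true) r).getD j false =
      (if a ≤ (j : Int) ∧ (j : Int) < b ∧ j < r.length then true else r.getD j false) := by
  by_cases hab : a < b
  · rw [PySem.List.pyRange_one_cons hab]
    simp only [List.foldl]
    rw [foldl_set_getD (a + 1) b (by omega) (r.set a.toNat true) j]
    have hlen : (r.set a.toNat true).length = r.length := by simp
    rw [hlen]
    by_cases hj1 : (a + 1 : Int) ≤ (j : Int) ∧ (j : Int) < b ∧ j < r.length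
    · rw [if_pos hj1, if_pos ⟨by omega, hj1.2⟩]
    · rw [if_neg hj1]
      by_cases hj2 : a ≤ (j : Int) ∧ (j : Int) < b ∧ j < r.length
      · -- here a = j (else hj1 would hold): the set at index a.toNat = j yields true
        have haj : a.toNat = j := by omega
        rw [if_pos hj2, List.getD_eq_getElem?_getD, ← haj,
          List.getElem?_set_self (show a.toNat < r.length by omega)]
        rfl
      · rw [if_neg hj2]
        by_cases hjr : j < r.length
        · have haj : a.toNat ≠ j := by
            intro h
            exact hj2 ⟨by omega, by omega, hjr⟩
          rw [List.getD_eq_getElem?_getD, List.getD_eq_getElem?_getD,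
            List.getElem?_set_ne haj]
        · rw [List.getD_eq_getElem?_getD, List.getD_eq_getElem?_getD,
            List.getElem?_eq_none (show (r.set a.toNat true).length ≤ j by simp; omega),
            List.getElem?_eq_none (show r.length ≤ j by omega)]
  · rw [PySem.List.pyRange_one_eq_nil (by omega)]
    simp only [List.foldl]
    rw [if_neg (show ¬ (a ≤ (j : Int) ∧ (j : Int) < b ∧ j < r.length) by omega)]
termination_by (b - a).toNat
decreasing_by omega

-- loopB never decreases m
lemma loopB_ge (nums : List Int) (i : Nat) (m : Int) : m ≤ loopB nums i m := by
  unfold loopB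
  split
  · split
    · exact le_refl _
    · exact le_trans (le_max_left _ _) (loopB_ge nums (i + 1) _)
  · exact le_refl _
termination_by nums.length - i

-- main invariant: the reachable array computed by loopA is the prefix [0, loopB …]
lemma loopA_loopB (nums : List Int) (i : Nat) (r : List Bool) (m : Int)
    (hlen : r.length = nums.length)
    (hinv : ∀ j : Nat, j < nums.length → r.getD j false = decide ((j : Int) ≤ m)) :
    ∀ j : Nat, j < nums.length →
      (loopA nums i r m).getD j false = decide ((j : Int) ≤ loopB nums i m) := by
  intro j hj
  unfold loopA loopB
  by_cases h : i < nums.length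
  · simp only [dif_pos h]
    by_cases hbr : (i : Int) > m
    · simp only [if_pos hbr]
      exact hinv j hj
    · simp only [if_neg hbr]
      set m' := max m ((i : Int) + nums.getD i 0) with hm'
      have hmm' : m ≤ m' := le_max_left _ _
      set r' := (PySem.List.pyRange ((i : Int) + 1) (min (m' + 1) (nums.length : Int)) 1).foldl
                  (fun acc j => acc.set j.toNat true) r with hr'
      have hlen' : r'.length = nums.length := by
        rw [hr', foldl_set_length, hlen]
      have hinv' : ∀ j : Nat, j < nums.length → r'.getD j false = decide ((j : Int) ≤ m') := by
        intro k hk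
        rw [hr', foldl_set_getD _ _ (by omega), hlen]
        by_cases hc : (i : Int) + 1 ≤ (k : Int) ∧ (k : Int) < min (m' + 1) (nums.length : Int) ∧ k < nums.length
        · simp [hc]; omega
        · rw [if_neg hc, hinv k hk]
          -- k ≤ m ↔ k ≤ m' here: if m < k ≤ m' then hc would hold
          by_cases hkm : (k : Int) ≤ m
          · simp [hkm]; omega
          · have : ¬ (k : Int) ≤ m' := by
              by_contra hkm'
              exact hc ⟨by omega, by omega, hk⟩
            simp [hkm, this]
      exact loopA_loopB nums (i + 1) r' m' hlen' hinv' j hj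
  · simp only [dif_neg h]
    exact hinv j hj
termination_by nums.length - i

-- filtering range(n) by i ≤ c gives the contiguous range [a, min (c+1) b)
lemma filter_pyRange_le (c : Int) (a b : Int) :
    (PySem.List.pyRange a b 1).filter (fun i => decide (i ≤ c)) =
      PySem.List.pyRange a (min (c + 1) b) 1 := by
  by_cases hab : a < b
  · rw [PySem.List.pyRange_one_cons hab]
    by_cases hac : a ≤ c
    · rw [List.filter_cons_of_pos (by simpa using hac),
        filter_pyRange_le c (a + 1) b]
      exact (PySem.List.pyRange_one_cons (lt_min (by omega) hab)).symm
    · rw [List.filter_cons_of_neg (by simpa using hac),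
        filter_pyRange_le c (a + 1) b,
        PySem.List.pyRange_one_eq_nil (by omega),
        PySem.List.pyRange_one_eq_nil (by omega)]
  · rw [PySem.List.pyRange_one_eq_nil (by omega),
      PySem.List.pyRange_one_eq_nil (by omega)]
    rfl
termination_by (b - a).toNat
decreasing_by all_goals omega

-- ===== VERDICT (by name: the statement is the Claim_ definition above) =====
theorem findReachablePositions_spec : Claim_equal_findReachablePositions := by
  intro nums _hdom hpre
  unfold Spec_findReachablePositions findReachablePositions findReachablePositions_alt
  obtain ⟨x, xs, rfl⟩ : ∃ x xs, nums = x :: xs := by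
    cases nums with
    | nil => exact absurd rfl hpre
    | cons x xs => exact ⟨x, xs, rfl⟩
  set nums := x :: xs
  set n := nums.length with hn
  have hn1 : 1 ≤ n := by simp [hn, nums]
  set r0 : List Bool := (List.replicate n false).set 0 true with hr0
  have hlen0 : r0.length = n := by simp [hr0]
  have hr0' : r0 = true :: List.replicate xs.length false := rfl
  have hinv0 : ∀ j : Nat, j < n → r0.getD j false = decide ((j : Int) ≤ (0 : Int)) := by
    intro j hj
    rw [hr0']
    cases j with
    | zero => simp
    | succ k =>
      have h0 : (List.replicate xs.length (false : Bool)).getD k false = false := by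
        simp [List.getD_eq_getElem?_getD, List.getElem?_replicate]
        split <;> rfl
      rw [List.getD_cons_succ, h0]
      symm
      simp only [decide_eq_false_iff_not]
      omega
  have hmain := loopA_loopB nums 0 r0 0 hlen0 hinv0
  set M := loopB nums 0 0 with hM
  have hM0 : 0 ≤ M := loopB_ge nums 0 0
  have hfc : (PySem.List.pyRange 0 (n : Int) 1).filter
        (fun i => (loopA nums 0 r0 0).getD i.toNat false) =
      (PySem.List.pyRange 0 (n : Int) 1).filter (fun i => decide (i ≤ M)) := by
    apply List.filter_congr
    intro i hi
    have hi' := (PySem.List.mem_pyRange_one).1 hi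
    have hti : i.toNat < n := by omega
    rw [hmain i.toNat hti]
    simp only [decide_eq_decide]
    omega
  rw [hfc, filter_pyRange_le]
  have : min (M + 1) (n : Int) = min M ((n : Int) - 1) + 1 := by omega
  rw [this]
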